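-- pv_equiv track=rewrite | github.com/kasyap1234/stock_bot_langgraph | agents/enhanced_technical_analysis.py | _categorize_timeframes
-- ===== SOURCE A (Python) =====
-- from typing import Dict, List, Any, Optional, Tuple
--
-- def _categorize_timeframes(weighted_signals: List[Dict]) -> set:
--     """Categorize timeframes into short-term, medium-term, and long-term"""
--     categories = set()
--     for signal_data in weighted_signals:
--         timeframe = signal_data['timeframe']
--         if timeframe in ['5m', '15m']:
--             categories.add('short_term')
--         elif timeframe in ['1H', '4H']:
--             categories.add('medium_term')
--         elif timeframe in ['1D', '1W', '1M']:
--             categories.add('long_term')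
--     return categories
-- ===== SOURCE B (Python) =====
-- def _categorize_timeframes(weighted_signals):
--     """Scan signals while maintaining the list of categories NOT yet found;
--     a matched category is appended to the output and its group removed."""
--     remaining = [({'5m', '15m'}, 'short_term'),
--                  ({'1H', '4H'}, 'medium_term'),
--                  ({'1D', '1W', '1M'}, 'long_term')]
--     found = []
--     for signal_data in weighted_signals:
--         timeframe = signal_data['timeframe']
--         for k, (members, category) in enumerate(remaining):
--             if timeframe in members:
--                 found.append(category)
--                 del remaining[k]
--                 break
--     return set(found)
-- ===== Notes on version B (the rewrite author's own statement) =====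
-- stated objective: alternative
-- what changed: Instead of growing a found-categories set with a per-element if/elif chain, B maintains the shrinking list of categories not yet found, removing a category's group the first time one of its timeframes appears and appending the category to the output in first-occurrence order.
import Mathlib
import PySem

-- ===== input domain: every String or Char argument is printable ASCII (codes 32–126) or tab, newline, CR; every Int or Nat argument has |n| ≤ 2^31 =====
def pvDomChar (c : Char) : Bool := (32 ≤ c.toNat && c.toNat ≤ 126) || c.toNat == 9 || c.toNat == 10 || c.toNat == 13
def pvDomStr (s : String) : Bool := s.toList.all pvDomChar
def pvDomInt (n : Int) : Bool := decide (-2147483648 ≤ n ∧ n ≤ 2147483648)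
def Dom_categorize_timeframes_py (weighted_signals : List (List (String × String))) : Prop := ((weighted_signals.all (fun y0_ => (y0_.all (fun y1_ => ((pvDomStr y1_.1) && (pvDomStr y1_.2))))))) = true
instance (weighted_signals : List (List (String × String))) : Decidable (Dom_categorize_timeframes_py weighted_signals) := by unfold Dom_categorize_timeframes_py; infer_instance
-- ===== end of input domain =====

-- B replaces A's grow-a-set if/elif loop by a scan that maintains the shrinking list of
-- not-yet-found category groups (objective: alternative, same cost).

-- first-match lookup of signal_data['timeframe']; Pre_ guarantees the key is present
-- (otherwise Python raises KeyError)
def pvTimeframe (signal_data : List (String × String)) : String :=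
  (List.lookup "timeframe" signal_data).getD ""

-- ===== PORT A =====
def categorize_timeframes_py (weighted_signals : List (List (String × String))) : List String :=
  weighted_signals.foldl (fun categories signal_data =>
    let timeframe := pvTimeframe signal_data
    if timeframe ∈ ["5m", "15m"] then PySem.Set.add categories "short_term"
    else if timeframe ∈ ["1H", "4H"] then PySem.Set.add categories "medium_term"
    else if timeframe ∈ ["1D", "1W", "1M"] then PySem.Set.add categories "long_term"
    else categories) PySem.Set.empty

-- ===== PORT B =====
-- B's initial `remaining` list: (group members, category) pairs
def pvGroups : List (List String × String) :=
  [(["5m", "15m"], "short_term"),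
   (["1H", "4H"], "medium_term"),
   (["1D", "1W", "1M"], "long_term")]

-- B's inner `for k, (members, category) in enumerate(remaining)` loop with
-- `del remaining[k]; break`: returns the matched category and the remaining list without it
def pvPick (t : String) : List (List String × String) → Option (String × List (List String × String))
  | [] => none
  | gc :: rest =>
    if t ∈ gc.1 then some (gc.2, rest)
    else (pvPick t rest).map (fun p => (p.1, gc :: p.2))

def categorize_timeframes_py_alt (weighted_signals : List (List (String × String))) : List String :=
  let final := weighted_signals.foldl
    (fun (st : List (List String × String) × List String) signal_data =>
      let timeframe := pvTimeframe signal_data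
      match pvPick timeframe st.1 with
      | some (c, rem) => (rem, st.2 ++ [c])
      | none => st) (pvGroups, [])
  PySem.Set.ofList final.2

-- ===== PRECONDITION & SPEC =====
-- Pre_ excludes signal dicts lacking a 'timeframe' key, on which both A and B raise KeyError.
def Pre_categorize_timeframes_py (weighted_signals : List (List (String × String))) : Prop :=
  (weighted_signals.all (fun s => (List.lookup "timeframe" s).isSome)) = true
instance (weighted_signals : List (List (String × String))) : Decidable (Pre_categorize_timeframes_py weighted_signals) := by unfold Pre_categorize_timeframes_py; infer_instance

def pvWitness_categorize_timeframes_py : (List (List (String × String))) :=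
  [[("timeframe", "5m")], [("timeframe", "1D"), ("x", "y")]]

def Spec_categorize_timeframes_py (weighted_signals : List (List (String × String))) (out : List String) : Prop := out = categorize_timeframes_py_alt weighted_signals
instance (weighted_signals : List (List (String × String))) (out : List String) : Decidable (Spec_categorize_timeframes_py weighted_signals out) := by unfold Spec_categorize_timeframes_py; infer_instance

-- ===== CLAIM (what is proved, stated in full; the proofs are below) =====
def Claim_equal_categorize_timeframes_py : Prop := ∀ (weighted_signals : List (List (String × String))), Dom_categorize_timeframes_py weighted_signals → Pre_categorize_timeframes_py weighted_signals → Spec_categorize_timeframes_py weighted_signals (categorize_timeframes_py weighted_signals)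

-- ===== LEMMAS AND PROOFS =====

-- the category A's if/elif chain assigns to a timeframe, phrased as first-matching-group
-- lookup in a group list (for G = pvGroups it is exactly A's chain, see pv_step_eq)
def pvCatOf (G : List (List String × String)) (t : String) : Option String :=
  match G with
  | [] => none
  | gc :: rest => if t ∈ gc.1 then some gc.2 else pvCatOf rest t

-- one element's effect on A's accumulator is exactly pvCatOf pvGroups
lemma pv_step_eq (acc : List String) (t : String) :
    (if t ∈ ["5m", "15m"] then PySem.Set.add acc "short_term"
     else if t ∈ ["1H", "4H"] then PySem.Set.add acc "medium_term"
     else if t ∈ ["1D", "1W", "1M"] then PySem.Set.add acc "long_term"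
     else acc)
    = (match pvCatOf pvGroups t with
       | some c => PySem.Set.add acc c
       | none => acc) := by
  simp only [pvCatOf, pvGroups]
  split_ifs <;> rfl

-- A's fold builds set(list of assigned categories)
lemma pv_fold_eq (ws : List (List (String × String))) (acc : List String) :
    ws.foldl (fun categories signal_data =>
      let timeframe := pvTimeframe signal_data
      if timeframe ∈ ["5m", "15m"] then PySem.Set.add categories "short_term"
      else if timeframe ∈ ["1H", "4H"] then PySem.Set.add categories "medium_term"
      else if timeframe ∈ ["1D", "1W", "1M"] then PySem.Set.add categories "long_term"
      else categories) acc
    = (ws.filterMap (fun s => pvCatOf pvGroups (pvTimeframe s))).foldl PySem.Set.add acc := by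
  induction ws generalizing acc with
  | nil => rfl
  | cons s rest ih =>
    simp only [List.foldl_cons, List.filterMap_cons]
    rw [pv_step_eq]
    cases pvCatOf pvGroups (pvTimeframe s) <;> exact ih _

lemma pv_pick_none {t : String} {G : List (List String × String)}
    (h : pvPick t G = none) : pvCatOf G t = none := by
  induction G with
  | nil => rfl
  | cons gc rest ih =>
    simp only [pvPick, pvCatOf] at *
    by_cases hm : t ∈ gc.1
    · simp [hm] at h
    · simp [hm] at h ⊢
      exact ih h

lemma pv_pick_some_cat {t c : String} {G G' : List (List String × String)}
    (h : pvPick t G = some (c, G')) : pvCatOf G t = some c := by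
  induction G generalizing G' with
  | nil => simp [pvPick] at h
  | cons gc rest ih =>
    simp only [pvPick, pvCatOf] at *
    by_cases hm : t ∈ gc.1
    · simp [hm] at h ⊢; exact h.1
    · simp only [hm, if_false, Option.map_eq_some_iff] at h
      obtain ⟨⟨c0, R0⟩, hp, hpr⟩ := h
      simp only [Prod.mk.injEq] at hpr
      simp only [hm, if_false]
      exact ih (hpr.1 ▸ hp)

lemma pv_pick_sublist {t c : String} {G G' : List (List String × String)}
    (h : pvPick t G = some (c, G')) : G'.Sublist G := by
  induction G generalizing G' with
  | nil => simp [pvPick] at h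
  | cons gc rest ih =>
    simp only [pvPick] at h
    by_cases hm : t ∈ gc.1
    · simp only [hm, if_true, Option.some.injEq, Prod.mk.injEq] at h
      exact h.2 ▸ List.sublist_cons_self gc rest
    · simp only [hm, if_false, Option.map_eq_some_iff] at h
      obtain ⟨⟨c0, R0⟩, hp, hpr⟩ := h
      simp only [Prod.mk.injEq] at hpr
      obtain ⟨hc, hR⟩ := hpr
      subst hR
      exact List.Sublist.cons₂ gc (ih (hc ▸ hp))

lemma pv_catOf_mem {x d : String} {G : List (List String × String)}
    (h : pvCatOf G x = some d) : d ∈ G.map Prod.snd := by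
  induction G with
  | nil => simp [pvCatOf] at h
  | cons gc rest ih =>
    simp only [pvCatOf] at h
    by_cases hm : x ∈ gc.1
    · simp [hm] at h; simp [h]
    · simp [hm] at h; simp [ih h]

lemma pv_pick_cat_mem {t c : String} {G G' : List (List String × String)}
    (h : pvPick t G = some (c, G')) : c ∈ G.map Prod.snd :=
  pv_catOf_mem (pv_pick_some_cat h)

-- removing the matched group from G turns pvCatOf G into pvCatOf G with c filtered out
-- a timeframe in none of G's groups gets no category
lemma pv_catOf_none {x : String} {G : List (List String × String)}
    (h : ∀ gd ∈ G, x ∉ gd.1) : pvCatOf G x = none := by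
  induction G with
  | nil => rfl
  | cons gd rest ih =>
    simp only [pvCatOf]
    simp [h gd List.mem_cons_self]
    exact ih (fun b hb => h b (List.mem_cons_of_mem _ hb))

lemma pv_pick_catOf_erase {t c : String} {G G' : List (List String × String)}
    (hdis : G.Pairwise (fun a b => ∀ x, x ∈ a.1 → x ∉ b.1))
    (hnd : (G.map Prod.snd).Nodup)
    (h : pvPick t G = some (c, G')) (x : String) :
    pvCatOf G' x = (pvCatOf G x).filter (fun d => !(d == c)) := by
  induction G generalizing G' with
  | nil => simp [pvPick] at h
  | cons gc rest ih =>
    simp only [pvPick] at h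
    rcases List.pairwise_cons.mp hdis with ⟨hgc, hrest⟩
    simp only [List.map_cons, List.nodup_cons] at hnd
    by_cases hm : t ∈ gc.1
    · simp only [hm, if_true, Option.some.injEq, Prod.mk.injEq] at h
      obtain ⟨hc, hG'⟩ := h
      subst hG'
      subst hc
      simp only [pvCatOf]
      by_cases hx : x ∈ gc.1
      · have hnone : pvCatOf rest x = none :=
          pv_catOf_none (fun gd hgd => (hgc gd hgd) x hx)
        simp [hnone, hx, Option.filter]
      · simp only [hx, if_false]
        cases hcr : pvCatOf rest x with
        | none => simp [Option.filter]
        | some d =>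
          have hd : d ≠ gc.2 := fun hdc => hnd.1 (hdc ▸ pv_catOf_mem hcr)
          simp [Option.filter, hd]
    · simp only [hm, if_false, Option.map_eq_some_iff] at h
      obtain ⟨⟨c0, R0⟩, hp, hpr⟩ := h
      simp only [Prod.mk.injEq] at hpr
      obtain ⟨hc, hR⟩ := hpr
      subst hR
      subst hc
      simp only [pvCatOf]
      by_cases hx : x ∈ gc.1
      · have hcR : c0 ∈ rest.map Prod.snd := pv_pick_cat_mem hp
        have hne : gc.2 ≠ c0 := fun hh => hnd.1 (hh ▸ hcR)
        simp [hx, Option.filter, hne]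
      · simp only [hx, if_false]
        exact ih hrest hnd.2 hp

-- set() commutes with filter (first-occurrence dedup of a filtered list)
lemma pv_filter_ofList (L : List String) (p : String → Bool) :
    (PySem.Set.ofList L).filter p = PySem.Set.ofList (L.filter p) := by
  induction L with
  | nil => rfl
  | cons x L ih =>
    by_cases hp : p x = true
    · have h1 : (x :: L).filter p = x :: L.filter p := by simp [hp]
      have h2 : (PySem.Set.ofList (x :: L)).filter p
          = x :: ((PySem.Set.ofList L).filter (fun y => !(y == x))).filter p := by
        rw [PySem.Set.ofList_cons, PySem.Set.discard]
        simp [hp]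
      rw [h1, h2, List.filter_comm, ih, PySem.Set.ofList_cons, PySem.Set.discard]
    · have h1 : (x :: L).filter p = L.filter p := by simp [hp]
      have h2 : (PySem.Set.ofList (x :: L)).filter p
          = ((PySem.Set.ofList L).filter (fun y => !(y == x))).filter p := by
        rw [PySem.Set.ofList_cons, PySem.Set.discard]
        simp [hp]
      rw [h1, h2, List.filter_comm, ih]
      apply List.filter_eq_self.mpr
      intro y hy
      have hyL : y ∈ L.filter p := (PySem.Set.mem_ofList _ _).mp hy
      have hyp := List.of_mem_filter hyL
      simp only [Bool.not_eq_eq_eq_not, Bool.not_true, beq_eq_false_iff_ne]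
      intro hyx
      subst hyx
      simp [hyp] at hp

lemma pv_scan_eq (ws : List (List (String × String)))
    (G : List (List String × String)) (found : List String)
    (hG : G.Sublist pvGroups) :
    (ws.foldl (fun (st : List (List String × String) × List String) signal_data =>
        let timeframe := pvTimeframe signal_data
        match pvPick timeframe st.1 with
        | some (c, rem) => (rem, st.2 ++ [c])
        | none => st) (G, found)).2
    = found ++ PySem.Set.ofList (ws.filterMap (fun s => pvCatOf G (pvTimeframe s))) := by
  induction ws generalizing G found with
  | nil => simp [PySem.Set.ofList]
  | cons s rest ih =>
    simp only [List.foldl_cons, List.filterMap_cons]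
    cases hp : pvPick (pvTimeframe s) G with
    | none =>
      rw [pv_pick_none hp]
      exact ih G found hG
    | some p =>
      cases p with
      | mk c G' =>
        rw [pv_pick_some_cat hp]
        have hG' : G'.Sublist pvGroups := (pv_pick_sublist hp).trans hG
        have hdis : G.Pairwise (fun a b => ∀ x, x ∈ a.1 → x ∉ b.1) := by
          have h0 : pvGroups.Pairwise (fun a b => ∀ x, x ∈ a.1 → x ∉ b.1) := by decide
          exact h0.sublist hG
        have hnd : (G.map Prod.snd).Nodup := by
          have h0 : (pvGroups.map Prod.snd).Nodup := by decide
          exact h0.sublist (hG.map Prod.snd)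
        rw [ih G' (found ++ [c]) hG']
        rw [PySem.Set.ofList_cons, PySem.Set.discard, pv_filter_ofList,
            List.filter_filterMap]
        have hcong : (rest.filterMap fun s =>
              (pvCatOf G (pvTimeframe s)).filter (fun d => !(d == c)))
            = rest.filterMap (fun s => pvCatOf G' (pvTimeframe s)) := by
          apply List.filterMap_congr
          intro x _
          exact (pv_pick_catOf_erase hdis hnd hp (pvTimeframe x)).symm
        rw [hcong]
        simp

-- ===== VERDICT (by name: the statement is the Claim_ definition above) =====
theorem categorize_timeframes_py_spec : Claim_equal_categorize_timeframes_py := by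
  intro ws _ _
  unfold Spec_categorize_timeframes_py categorize_timeframes_py
  have halt : categorize_timeframes_py_alt ws
      = PySem.Set.ofList ((ws.foldl (fun (st : List (List String × String) × List String) signal_data =>
          let timeframe := pvTimeframe signal_data
          match pvPick timeframe st.1 with
          | some (c, rem) => (rem, st.2 ++ [c])
          | none => st) (pvGroups, []))).2 := rfl
  rw [pv_fold_eq, halt, pv_scan_eq ws pvGroups [] (List.Sublist.refl _),
      List.nil_append, PySem.Set.ofList_ofList]
  rfl
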